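-- pv_equiv track=rewrite | github.com/pypi-data/pypi-mirror-403 | packages/justhtml/justhtml-1.4.0.tar.gz/justhtml-1.4.0/tests/test_docs_examples.py | _line_matches
-- ===== SOURCE A (Python) =====
-- def _line_matches(expected_line: str, actual_line: str) -> bool:
--     if expected_line == actual_line:
--         return True
--
--     # Allow single-line wildcards using "..." inside a line.
--     if "..." not in expected_line:
--         return False
--
--     parts = expected_line.split("...")
--     pos = 0
--     for part in parts:
--         if part == "":
--             continue
--         idx = actual_line.find(part, pos)
--         if idx == -1:
--             return False
--         pos = idx + len(part)
--     return True
-- ===== SOURCE B (Python) =====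
-- def _skip_past(part, text):
--     """Suffix of text after the first occurrence of part, found by a char-by-char
--     startswith scan over shrinking suffixes; None if part does not occur."""
--     while True:
--         if text.startswith(part):
--             return text[len(part):]
--         if not text:
--             return None
--         text = text[1:]
--
--
-- def _match_parts(parts, text):
--     if not parts:
--         return True
--     rest = _skip_past(parts[0], text)
--     if rest is None:
--         return False
--     return _match_parts(parts[1:], rest)
--
--
-- def _line_matches(expected_line: str, actual_line: str) -> bool:
--     if "..." not in expected_line:
--         return expected_line == actual_line
--     if expected_line == actual_line:
--         return True
--     return _match_parts([p for p in expected_line.split("...") if p], actual_line)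
-- ===== Notes on version B (the rewrite author's own statement) =====
-- stated objective: alternative
-- what changed: A's single cursor-indexed loop calling str.find(part, pos) over all split parts is replaced by reordered guards plus a recursion over the pre-filtered nonempty parts in which each part is located by a char-by-char startswith scan over shrinking suffixes of the text (no str.find, no cursor index).
import Mathlib
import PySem

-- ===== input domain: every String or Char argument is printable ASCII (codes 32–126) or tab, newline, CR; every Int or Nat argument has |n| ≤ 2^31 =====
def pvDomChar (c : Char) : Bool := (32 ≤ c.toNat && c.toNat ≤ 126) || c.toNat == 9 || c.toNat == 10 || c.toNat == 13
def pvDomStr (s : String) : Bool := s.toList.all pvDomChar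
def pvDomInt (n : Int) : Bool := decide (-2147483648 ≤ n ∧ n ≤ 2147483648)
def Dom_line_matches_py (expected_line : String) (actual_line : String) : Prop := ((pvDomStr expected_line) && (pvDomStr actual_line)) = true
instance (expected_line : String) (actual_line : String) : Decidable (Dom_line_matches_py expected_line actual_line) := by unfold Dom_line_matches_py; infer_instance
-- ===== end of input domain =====

-- B replaces A's cursor-indexed str.find loop by reordered guards and a recursion over the
-- pre-filtered nonempty parts, locating each part by a char-by-char startswith scan
-- over shrinking suffixes (alternative decomposition, same cost).

-- ===== PORT A =====
-- the 'for part in parts' loop: state is the cursor pos into actual_line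
def goA_line : List (List Char) → List Char → Int → Bool
  | [], _, _ => true
  | p :: ps, act, pos =>
    if p = [] then goA_line ps act pos
    else
      let idx := PySem.Chars.findFrom act p pos
      if idx = -1 then false
      else goA_line ps act (idx + (p.length : Int))

def line_matches_py (expected_line : String) (actual_line : String) : Bool :=
  if expected_line.toList = actual_line.toList then true
  else if !(PySem.Chars.isIn "...".toList expected_line.toList) then false
  else goA_line (PySem.Chars.splitOn expected_line.toList "...".toList) actual_line.toList 0

-- ===== PORT B =====
-- _skip_past: char-by-char startswith scan; the suffix after the first occurrence, or none
def skipPast (part : List Char) : List Char → Option (List Char)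
  | [] => if part.isPrefixOf [] then some (([] : List Char).drop part.length) else none
  | c :: t =>
    if part.isPrefixOf (c :: t) then some ((c :: t).drop part.length)
    else skipPast part t

-- _match_parts: recursion over the remaining parts on the remaining suffix
def matchParts : List (List Char) → List Char → Bool
  | [], _ => true
  | p :: ps, text =>
    match skipPast p text with
    | none => false
    | some rest => matchParts ps rest

def line_matches_py_alt (expected_line : String) (actual_line : String) : Bool :=
  if !(PySem.Chars.isIn "...".toList expected_line.toList) then
    expected_line.toList = actual_line.toList
  else if expected_line.toList = actual_line.toList then true
  else
    matchParts ((PySem.Chars.splitOn expected_line.toList "...".toList).filter (fun p => !p.isEmpty))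
      actual_line.toList

-- ===== PRECONDITION & SPEC =====
def Spec_line_matches_py (expected_line : String) (actual_line : String) (out : Bool) : Prop := out = line_matches_py_alt expected_line actual_line
instance (expected_line : String) (actual_line : String) (out : Bool) : Decidable (Spec_line_matches_py expected_line actual_line out) := by unfold Spec_line_matches_py; infer_instance

-- ===== CLAIM (what is proved, stated in full; the proofs are below) =====
def Claim_equal_line_matches_py : Prop := ∀ (expected_line : String) (actual_line : String), Dom_line_matches_py expected_line actual_line → Spec_line_matches_py expected_line actual_line (line_matches_py expected_line actual_line)

-- ===== LEMMAS AND PROOFS =====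

-- find is characterised by "prefix here, no prefix earlier"
lemma find_eq_of_min (t p : List Char) (k : Nat)
    (hpre : p <+: t.drop k) (hmin : ∀ i < k, ¬ p <+: t.drop i) :
    PySem.Chars.find t p = (k : Int) := by
  have hin : PySem.Chars.isIn p t = true :=
    (PySem.Chars.exists_prefix_drop_iff_isIn (s := t) (sub := p)).mp ⟨k, hpre⟩
  have hnn : 0 ≤ PySem.Chars.find t p :=
    (PySem.Chars.find_nonneg_iff t p).mpr ((PySem.Chars.isIn_iff_infix p t).mp hin)
  obtain ⟨hp2, hmin2⟩ := PySem.Chars.find_spec (s := t) (sub := p) hnn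
  have h1 : ¬ (PySem.Chars.find t p).toNat < k := fun h => hmin _ h hp2
  have h2 : ¬ k < (PySem.Chars.find t p).toNat := fun h => hmin2 k h hpre
  omega

-- the char-level scan computes exactly what str.find computes
lemma skipPast_eq_find (p : List Char) : ∀ t : List Char,
    skipPast p t =
      (if PySem.Chars.find t p = -1 then none
       else some (t.drop ((PySem.Chars.find t p).toNat + p.length))) := by
  intro t
  induction t with
  | nil =>
    by_cases hp : p = []
    · subst hp
      simp [skipPast, PySem.Chars.find_nil]
    · have : ¬ p <:+: ([] : List Char) := by
        simp [List.infix_nil, hp]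
      simp [skipPast, List.isPrefixOf_iff_prefix, List.prefix_nil, hp,
        (PySem.Chars.find_eq_neg_one_iff _ _).mpr this]
  | cons c t' ih =>
    by_cases hpre : p <+: (c :: t')
    · have h0 : PySem.Chars.find (c :: t') p = ((0 : Nat) : Int) :=
        find_eq_of_min _ _ 0 (by simpa using hpre) (by omega)
      simp [skipPast, List.isPrefixOf_iff_prefix, hpre, h0]
    · have hnp : ¬ p.isPrefixOf (c :: t') := by
        simpa [List.isPrefixOf_iff_prefix] using hpre
      simp only [skipPast, hnp, Bool.false_eq_true, if_false]
      rw [ih]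
      by_cases hf : PySem.Chars.find t' p = -1
      · have hni : ¬ p <:+: t' := (PySem.Chars.find_eq_neg_one_iff _ _).mp hf
        have : ¬ p <:+: (c :: t') := by
          rw [List.infix_cons_iff]
          rintro (h | h)
          exacts [hpre h, hni h]
        simp [hf, (PySem.Chars.find_eq_neg_one_iff _ _).mpr this]
      · have hnn : 0 ≤ PySem.Chars.find t' p := by
          have := PySem.Chars.neg_one_le_find t' p
          omega
        obtain ⟨m, hm⟩ : ∃ m : Nat, PySem.Chars.find t' p = (m : Int) :=
          ⟨(PySem.Chars.find t' p).toNat, (Int.toNat_of_nonneg hnn).symm⟩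
        obtain ⟨hp2, hmin2⟩ := PySem.Chars.find_spec (s := t') (sub := p) hnn
        rw [hm] at hp2 hmin2
        simp only [Int.toNat_natCast] at hp2 hmin2
        have hfind : PySem.Chars.find (c :: t') p = ((m + 1 : Nat) : Int) := by
          apply find_eq_of_min
          · simpa using hp2
          · intro i hi
            match i with
            | 0 => simpa using hpre
            | j + 1 =>
              have : j < m := by omega
              simpa using hmin2 j this
        rw [hfind, hm]
        rw [if_neg (by omega : ¬ ((m : Int) = -1))]
        rw [if_neg (by omega : ¬ (((m + 1 : Nat) : Int) = -1))]
        simp only [Int.toNat_natCast]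
        rw [show m + 1 + p.length = (m + p.length) + 1 by omega]
        simp [List.drop_succ_cons]

-- the cursor loop equals the filtered recursion on the corresponding suffix
lemma go_eq_line (parts : List (List Char)) (act : List Char) :
    ∀ (k : Nat), k ≤ act.length →
      goA_line parts act (k : Int)
        = matchParts (parts.filter (fun p => !p.isEmpty)) (act.drop k) := by
  induction parts with
  | nil => intro k hk; simp [goA_line, matchParts]
  | cons p ps ih =>
    intro k hk
    by_cases hp : p = []
    · subst hp
      simpa [goA_line, List.filter] using ih k hk
    · have hpe : (!p.isEmpty) = true := by simp [hp]
      set f := PySem.Chars.find (act.drop k) p with hf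
      by_cases h1 : f = -1
      · simp [goA_line, matchParts, hp, hpe, PySem.Chars.findFrom_natCast act p k hk, ← hf, h1,
          skipPast_eq_find]
      · have hf0 : 0 ≤ f := by
          have := PySem.Chars.neg_one_le_find (act.drop k) p
          rw [← hf] at this; omega
        obtain ⟨n, hn⟩ : ∃ n : Nat, f = (n : Int) := ⟨f.toNat, (Int.toNat_of_nonneg hf0).symm⟩
        have hspec := (PySem.Chars.find_spec (s := act.drop k) (sub := p) (by rw [← hf]; exact hf0)).1
        rw [← hf, hn] at hspec
        simp only [Int.toNat_natCast] at hspec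
        have hp1 : 0 < p.length := List.length_pos_iff.mpr hp
        have hlen : n + p.length ≤ act.length - k := by
          have h := hspec.length_le
          rw [List.length_drop, List.length_drop] at h
          omega
        have hA : goA_line (p :: ps) act (↑k)
            = goA_line ps act ((k + n + p.length : Nat) : Int) := by
          simp only [goA_line, if_neg hp]
          rw [PySem.Chars.findFrom_natCast act p k hk, ← hf, hn]
          rw [if_neg (by omega : ¬ ((n : Int) = -1))]
          rw [if_neg (by omega : ¬ ((k : Int) + (n : Int) = -1))]
          rw [show (k : Int) + (n : Int) + (p.length : Int) = ((k + n + p.length : Nat) : Int) by push_cast; ring]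
        have hB : matchParts ((p :: ps).filter (fun q => !q.isEmpty)) (act.drop k)
            = matchParts (ps.filter (fun q => !q.isEmpty)) (act.drop (k + n + p.length)) := by
          simp only [List.filter_cons, hpe, if_true]
          rw [show matchParts (p :: ps.filter (fun q => !q.isEmpty)) (act.drop k)
                = match skipPast p (act.drop k) with
                  | none => false
                  | some rest => matchParts (ps.filter (fun q => !q.isEmpty)) rest from rfl]
          rw [skipPast_eq_find, ← hf, hn]
          rw [if_neg (by omega : ¬ ((n : Int) = -1))]
          simp only [Int.toNat_natCast, List.drop_drop]
          congr 2
          omega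
        rw [hA, hB]
        exact ih (k + n + p.length) (by omega)

-- ===== VERDICT (by name: the statement is the Claim_ definition above) =====
theorem line_matches_py_spec : Claim_equal_line_matches_py := by
  intro e a _
  unfold Spec_line_matches_py line_matches_py line_matches_py_alt
  cases hc : PySem.Chars.isIn "...".toList e.toList with
  | false =>
    by_cases h1 : e.toList = a.toList <;> simp [h1]
  | true =>
    by_cases h1 : e.toList = a.toList
    · simp [h1]
    · simp only [if_neg h1, Bool.not_true, Bool.false_eq_true, if_false]
      simpa using go_eq_line (PySem.Chars.splitOn e.toList "...".toList) a.toList 0 (Nat.zero_le _)
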